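-- pv_equiv track=rewrite | github.com/Zhavi221/atlas-utilization | src/parse_atlas/combinatorics.py | make_objects_categories
-- ===== SOURCE A (Python) =====
-- import itertools
-- from typing import Dict, List, Iterator, Tuple
--
-- def make_objects_categories(
--     object_types: List[str],
--     min_n: int = 2,
--     max_n: int = 4
-- ) -> List[Dict[str, int]]:
--     """
--     Enumerate all event categories where each object type
--                     has between min_n and max_n entries.
--     """
--
--     limits = [range(min_n, max_n+1) for _ in object_types]
--     categories = []
--     for counts in itertools.product(*limits):
--         categories.append(dict(zip(object_types, counts)))
--
--     return categories
-- ===== SOURCE B (Python) =====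
-- def make_objects_categories(object_types, min_n=2, max_n=4):
--     # Incremental fold: extend every partial dict by one object type per pass.
--     categories = [{}]
--     for obj in object_types:
--         categories = [{**c, obj: n}
--                       for c in categories
--                       for n in range(min_n, max_n + 1)]
--     return categories
-- ===== Notes on version B (the rewrite author's own statement) =====
-- stated objective: alternative
-- what changed: Replaces itertools.product over precomputed ranges plus dict(zip(...)) per tuple with an incremental fold that starts from [{}] and, for each object type, rebuilds the list by extending every partial dict with each count in range(min_n, max_n+1).
import Mathlib
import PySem

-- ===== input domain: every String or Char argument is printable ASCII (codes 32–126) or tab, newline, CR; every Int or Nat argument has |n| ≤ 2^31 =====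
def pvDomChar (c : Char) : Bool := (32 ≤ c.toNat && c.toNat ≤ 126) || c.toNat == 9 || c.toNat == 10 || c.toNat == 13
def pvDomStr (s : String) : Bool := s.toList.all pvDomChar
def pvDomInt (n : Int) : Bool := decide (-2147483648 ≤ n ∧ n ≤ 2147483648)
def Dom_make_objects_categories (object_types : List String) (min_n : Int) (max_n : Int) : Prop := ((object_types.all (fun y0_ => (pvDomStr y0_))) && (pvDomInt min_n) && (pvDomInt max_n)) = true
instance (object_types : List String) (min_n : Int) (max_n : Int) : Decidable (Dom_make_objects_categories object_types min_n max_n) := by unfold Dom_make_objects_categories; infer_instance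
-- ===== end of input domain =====

-- B replaces itertools.product + dict(zip(...)) with an incremental fold extending partial dicts; alternative decomposition, same cost.
-- ===== PORT A =====
def pvProdA : List (List Int) → List (List Int)
  | [] => [[]]
  | l :: ls => l.flatMap (fun x => (pvProdA ls).map (fun rest => x :: rest))

def pvDictZip (ts : List String) (cs : List Int) : PySem.Dict String Int :=
  (List.zip ts cs).foldl (fun d p => d.insert p.1 p.2) PySem.Dict.empty

def make_objects_categories (object_types : List String) (min_n : Int) (max_n : Int) : List (List (String × Int)) :=
  let limits := object_types.map (fun _ => PySem.List.pyRange min_n (max_n + 1) 1)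
  ((pvProdA limits).foldl
      (fun categories counts => categories ++ [(pvDictZip object_types counts).items]) [])

-- ===== PORT B =====
def make_objects_categories_alt (object_types : List String) (min_n : Int) (max_n : Int) : List (List (String × Int)) :=
  (object_types.foldl
      (fun categories obj =>
        categories.flatMap (fun c =>
          (PySem.List.pyRange min_n (max_n + 1) 1).map (fun n => c.insert obj n)))
      ([PySem.Dict.empty] : List (PySem.Dict String Int))).map (fun d => d.items)

-- ===== PRECONDITION & SPEC =====
def Spec_make_objects_categories (object_types : List String) (min_n : Int) (max_n : Int) (out : List (List (String × Int))) : Prop := out = make_objects_categories_alt object_types min_n max_n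
instance (object_types : List String) (min_n : Int) (max_n : Int) (out : List (List (String × Int))) : Decidable (Spec_make_objects_categories object_types min_n max_n out) := by unfold Spec_make_objects_categories; infer_instance

-- ===== CLAIM (what is proved, stated in full; the proofs are below) =====
def Claim_equal_make_objects_categories : Prop := ∀ (object_types : List String) (min_n : Int) (max_n : Int), Dom_make_objects_categories object_types min_n max_n → Spec_make_objects_categories object_types min_n max_n (make_objects_categories object_types min_n max_n)

-- ===== LEMMAS AND PROOFS =====

lemma pvFoldlAppend {α β : Type} (f : α → β) (l : List α) (acc : List β) :
    l.foldl (fun cats x => cats ++ [f x]) acc = acc ++ l.map f := by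
  induction l generalizing acc with
  | nil => simp
  | cons x xs ih => simp [ih]

lemma pvKey (ts : List String) (r : List Int) (cats : List (PySem.Dict String Int)) :
    ts.foldl (fun categories obj =>
        categories.flatMap (fun c => r.map (fun n => c.insert obj n))) cats
    = cats.flatMap (fun d =>
        (pvProdA (ts.map (fun _ => r))).map (fun counts =>
          (List.zip ts counts).foldl (fun d p => d.insert p.1 p.2) d)) := by
  induction ts generalizing cats with
  | nil => simp [pvProdA]
  | cons t ts ih =>
    simp only [List.foldl_cons, ih, List.map_cons, pvProdA]
    induction cats with
    | nil => simp
    | cons c cs ihc =>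
      simp only [List.flatMap_cons, List.flatMap_append, ihc]
      congr 1
      simp [List.map_flatMap, List.flatMap_map, List.map_map, Function.comp_def]

-- ===== VERDICT (by name: the statement is the Claim_ definition above) =====
theorem make_objects_categories_spec : Claim_equal_make_objects_categories := by
  intro object_types min_n max_n _
  unfold Spec_make_objects_categories make_objects_categories make_objects_categories_alt
  rw [pvKey, pvFoldlAppend]
  simp [pvDictZip]
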